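-- pv_equiv track=rewrite | github.com/ArnaudDroitLab/sb_cofactor | mESC/scripts/framptongram/batch2/framptongram_3.py | calculate_bp_length_chrom_regions
-- ===== SOURCE A (Python) =====
-- def calculate_bp_length_chrom_regions( chrom_regions ):
--
-- 	total_regions = 0
-- 	total_bp = 0
-- 	for chrom in chrom_regions:
-- 		for region in chrom_regions[ chrom ]:
-- 			total_regions += 1
-- 			total_bp += region[1] - region[0]
--
-- 	return total_regions, total_bp
-- ===== SOURCE B (Python) =====
-- def calculate_bp_length_chrom_regions(chrom_regions):
--     flat = []
--     for regions in chrom_regions.values():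
--         flat.extend(regions)
--     start_total = sum(s for s, _ in flat)
--     end_total = sum(e for _, e in flat)
--     return len(flat), end_total - start_total
-- ===== Notes on version B (the rewrite author's own statement) =====
-- stated objective: alternative
-- what changed: Instead of A's fused nested loop accumulating a count and per-region subtractions end-start, B flattens all region lists into one list, takes the count as its length, and computes total bp algebraically as (sum of all ends) - (sum of all starts), exploiting sum(e_i - s_i) = sum(e_i) - sum(s_i).
import Mathlib
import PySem

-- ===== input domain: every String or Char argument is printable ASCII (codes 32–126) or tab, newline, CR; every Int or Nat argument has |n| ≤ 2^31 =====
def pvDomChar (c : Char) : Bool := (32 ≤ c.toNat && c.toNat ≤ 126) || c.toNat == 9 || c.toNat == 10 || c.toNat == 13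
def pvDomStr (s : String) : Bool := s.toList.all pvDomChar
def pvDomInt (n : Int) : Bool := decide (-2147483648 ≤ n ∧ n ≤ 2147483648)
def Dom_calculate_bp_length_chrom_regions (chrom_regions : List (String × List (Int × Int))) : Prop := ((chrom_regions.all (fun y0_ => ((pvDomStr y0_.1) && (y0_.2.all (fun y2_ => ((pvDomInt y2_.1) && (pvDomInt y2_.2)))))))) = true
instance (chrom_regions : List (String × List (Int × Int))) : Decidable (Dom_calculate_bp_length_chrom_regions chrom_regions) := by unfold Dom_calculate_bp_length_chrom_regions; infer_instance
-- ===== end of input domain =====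

-- B flattens all regions once and computes the bp total as (sum of ends) - (sum of starts),
-- instead of A's fused nested loop with per-region subtractions; objective: alternative (same cost).

-- ===== PORT A =====
-- for chrom in chrom_regions: for region in chrom_regions[chrom]: count += 1; bp += region[1]-region[0]
def calculate_bp_length_chrom_regions (chrom_regions : List (String × List (Int × Int))) : Int × Int :=
  let d := PySem.Dict.mk chrom_regions
  d.keys.foldl
    (fun st chrom =>
      (d.getD chrom []).foldl
        (fun st region => (st.1 + 1, st.2 + (region.2 - region.1))) st)
    (0, 0)

-- ===== PORT B =====
-- flat = []; for regions in values: flat.extend(regions); return len(flat), sum(ends) - sum(starts)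
def calculate_bp_length_chrom_regions_alt (chrom_regions : List (String × List (Int × Int))) : Int × Int :=
  let flat := chrom_regions.foldl (fun acc kv => acc ++ kv.2) []
  ((flat.length : Int),
   (flat.map Prod.snd).sum - (flat.map Prod.fst).sum)

-- ===== PRECONDITION & SPEC =====
-- Pre_ excludes association lists with duplicate chromosome keys: a Python dict cannot
-- contain them, so such lists do not represent any input A is ever called on.
def Pre_calculate_bp_length_chrom_regions (chrom_regions : List (String × List (Int × Int))) : Prop :=
  (chrom_regions.map Prod.fst).Nodup
instance (chrom_regions : List (String × List (Int × Int))) : Decidable (Pre_calculate_bp_length_chrom_regions chrom_regions) := by unfold Pre_calculate_bp_length_chrom_regions; infer_instance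

def pvWitness_calculate_bp_length_chrom_regions : (List (String × List (Int × Int))) :=
  [("chr1", [(1, 5), (10, 12)]), ("chr2", [(0, 3)])]

def Spec_calculate_bp_length_chrom_regions (chrom_regions : List (String × List (Int × Int))) (out : Int × Int) : Prop := out = calculate_bp_length_chrom_regions_alt chrom_regions
instance (chrom_regions : List (String × List (Int × Int))) (out : Int × Int) : Decidable (Spec_calculate_bp_length_chrom_regions chrom_regions out) := by unfold Spec_calculate_bp_length_chrom_regions; infer_instance

-- ===== CLAIM (what is proved, stated in full; the proofs are below) =====
def Claim_equal_calculate_bp_length_chrom_regions : Prop := ∀ (chrom_regions : List (String × List (Int × Int))), Dom_calculate_bp_length_chrom_regions chrom_regions → Pre_calculate_bp_length_chrom_regions chrom_regions → Spec_calculate_bp_length_chrom_regions chrom_regions (calculate_bp_length_chrom_regions chrom_regions)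

-- ===== LEMMAS AND PROOFS =====

-- A's inner loop over one chromosome's regions
lemma pv_inner (l : List (Int × Int)) (st : Int × Int) :
    l.foldl (fun st region => (st.1 + 1, st.2 + (region.2 - region.1))) st
      = (st.1 + l.length, st.2 + ((l.map Prod.snd).sum - (l.map Prod.fst).sum)) := by
  induction l generalizing st with
  | nil => simp
  | cons a t ih =>
    simp only [List.foldl_cons, List.length_cons, List.map_cons, List.sum_cons, ih]
    refine Prod.ext ?_ ?_ <;> push_cast <;> ring

-- A's outer loop, for any dict that looks up each listed key to its listed value
lemma pv_outer (d : PySem.Dict String (List (Int × Int)))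
    (l : List (String × List (Int × Int)))
    (h : ∀ kv ∈ l, d.getD kv.1 [] = kv.2) (st : Int × Int) :
    (l.map Prod.fst).foldl
      (fun st chrom =>
        (d.getD chrom []).foldl
          (fun st region => (st.1 + 1, st.2 + (region.2 - region.1))) st) st
      = (st.1 + ((l.map Prod.snd).flatten.length : Int),
         st.2 + (((l.map Prod.snd).flatten.map Prod.snd).sum
                 - ((l.map Prod.snd).flatten.map Prod.fst).sum)) := by
  induction l generalizing st with
  | nil => simp
  | cons kv t ih =>
    simp only [List.map_cons, List.foldl_cons, List.flatten_cons, List.map_append,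
      List.sum_append, List.length_append]
    rw [h kv (List.mem_cons_self ..), pv_inner,
      ih (fun kv hkv => h kv (List.mem_cons_of_mem _ hkv))]
    refine Prod.ext ?_ ?_ <;> push_cast <;> ring

-- B's extend loop builds the flattened list of all region lists
lemma pv_flat (l : List (String × List (Int × Int))) (acc : List (Int × Int)) :
    l.foldl (fun acc kv => acc ++ kv.2) acc = acc ++ (l.map Prod.snd).flatten := by
  induction l generalizing acc with
  | nil => simp
  | cons kv t ih => simp [ih, List.append_assoc]

-- ===== VERDICT (by name: the statement is the Claim_ definition above) =====
theorem calculate_bp_length_chrom_regions_spec : Claim_equal_calculate_bp_length_chrom_regions := by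
  intro cr _ hpre
  unfold Spec_calculate_bp_length_chrom_regions
  unfold calculate_bp_length_chrom_regions calculate_bp_length_chrom_regions_alt
  have hkeys : (PySem.Dict.mk cr).keys = cr.map Prod.fst := by
    simp [PySem.Dict.keys]
  have h : ∀ kv ∈ cr, (PySem.Dict.mk cr).getD kv.1 [] = kv.2 := by
    intro kv hkv
    exact PySem.Dict.getD_of_mem_items (d := PySem.Dict.mk cr) (k := kv.1) (v := kv.2)
      hkv (by rw [hkeys]; exact hpre) []
  simp only [hkeys, pv_flat]
  rw [pv_outer _ _ h]
  simp
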